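-- pv_equiv track=rewrite | github.com/JasonBalayev/aoc24 | 14/main.py | find_high_cluster_areas
-- ===== SOURCE A (Python) =====
-- def find_high_cluster_areas(grid):
--     width, height = len(grid[0]), len(grid)
--     # Calculate the size of each area
--     area_width = width // 10
--     area_height = height // 10
--
--     # Check each area
--     for area_y in range(10):
--         for area_x in range(10):
--             robot_count = 0
--             # Get the bounds for this area
--             start_y = area_y * area_height
--             end_y = start_y + area_height
--             start_x = area_x * area_width
--             end_x = start_x + area_width
--
--             # Count robots in this area
--             for y in range(start_y, end_y):
--                 for x in range(start_x, end_x):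
--                     robot_count += grid[y][x]
--
--             # If we find an area with more than 50 robots, return True
--             if robot_count > 50:
--                 return True
--
--     return False
-- ===== SOURCE B (Python) =====
-- def find_high_cluster_areas(grid):
--     width, height = len(grid[0]), len(grid)
--     area_width = width // 10
--     area_height = height // 10
--     if area_width == 0 or area_height == 0:
--         return False
--     # One linear pass over the covered cells, accumulating a 10x10 histogram
--     counts = [[0] * 10 for _ in range(10)]
--     for y in range(10 * area_height):
--         row = grid[y]
--         by = y // area_height
--         for x in range(10 * area_width):
--             counts[by][x // area_width] += row[x]
--     return any(c > 50 for bucket_row in counts for c in bucket_row)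
-- ===== Notes on version B (the rewrite author's own statement) =====
-- stated objective: alternative
-- what changed: Replaces A's bucket-major 4-deep nested loops (for each of the 100 areas, re-derive its bounds and scan its cells) by a single row-major pass over the covered cells that accumulates a 10x10 histogram via bucket indices y//area_height, x//area_width, then checks the table.
import Mathlib
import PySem

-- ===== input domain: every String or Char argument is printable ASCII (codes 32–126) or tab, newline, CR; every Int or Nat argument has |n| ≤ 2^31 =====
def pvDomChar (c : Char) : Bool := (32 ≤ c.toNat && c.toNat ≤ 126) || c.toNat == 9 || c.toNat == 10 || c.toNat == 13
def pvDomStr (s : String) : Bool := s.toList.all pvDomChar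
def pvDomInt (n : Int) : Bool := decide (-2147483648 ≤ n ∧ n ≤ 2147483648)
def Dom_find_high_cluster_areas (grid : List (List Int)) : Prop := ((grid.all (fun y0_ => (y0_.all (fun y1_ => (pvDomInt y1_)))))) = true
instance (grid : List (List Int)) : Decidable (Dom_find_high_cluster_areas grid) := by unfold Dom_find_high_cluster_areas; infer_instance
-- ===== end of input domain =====

-- B replaces A's bucket-major 4-deep nested loops by a single row-major pass over the
-- covered cells that accumulates a 10x10 histogram table (objective: alternative).

-- ===== PORT A =====
def find_high_cluster_areas (grid : List (List Int)) : Bool :=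
  let width : Int := ((PySem.List.pyGet? grid 0).getD []).length
  let height : Int := (grid.length : Int)
  let area_width := PySem.Int.floordiv width 10
  let area_height := PySem.Int.floordiv height 10
  -- the two 'for area in range(10)' loops with early 'return True' = short-circuit any
  (PySem.List.pyRange 0 10).any fun area_y =>
    (PySem.List.pyRange 0 10).any fun area_x =>
      let start_y := area_y * area_height
      let end_y := start_y + area_height
      let start_x := area_x * area_width
      let end_x := start_x + area_width
      let robot_count := (PySem.List.pyRange start_y end_y).foldl (fun acc y =>
        (PySem.List.pyRange start_x end_x).foldl (fun acc x =>
          acc + PySem.List.pyGetD (PySem.List.pyGetD grid y []) x 0) acc) 0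
      decide (robot_count > 50)

-- ===== PORT B =====
def find_high_cluster_areas_alt (grid : List (List Int)) : Bool :=
  let width : Int := ((PySem.List.pyGet? grid 0).getD []).length
  let height : Int := (grid.length : Int)
  let area_width := PySem.Int.floordiv width 10
  let area_height := PySem.Int.floordiv height 10
  if area_width = 0 ∨ area_height = 0 then false
  else
    let counts := (PySem.List.pyRange 0 (10 * area_height)).foldl (fun t y =>
      let row := PySem.List.pyGetD grid y []
      let bY := PySem.Int.floordiv y area_height
      (PySem.List.pyRange 0 (10 * area_width)).foldl (fun t x =>
        t.modify bY.toNat (fun r => r.modify (PySem.Int.floordiv x area_width).toNat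
          (fun c => c + PySem.List.pyGetD row x 0))) t)
      (List.replicate 10 (List.replicate 10 (0 : Int)))
    counts.any fun bucket_row => bucket_row.any fun c => decide (c > 50)

-- ===== PRECONDITION & SPEC =====
-- Pre_ excludes the empty grid (A raises IndexError on grid[0]) and, when height ≥ 10,
-- ragged grids with a row shorter than 10*(width//10): on those the cell scan generally
-- raises IndexError (whether A raises or happens to return True first depends on its
-- accidental bucket-major scan order, and B's row-major scan raises there too).
def Pre_find_high_cluster_areas (grid : List (List Int)) : Prop :=
  grid ≠ [] ∧ (10 ≤ grid.length → ∀ row ∈ grid, 10 * ((grid.headI).length / 10) ≤ row.length)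
instance (grid : List (List Int)) : Decidable (Pre_find_high_cluster_areas grid) := by
  unfold Pre_find_high_cluster_areas; infer_instance

def pvWitness_find_high_cluster_areas : List (List Int) := [[0]]

def Spec_find_high_cluster_areas (grid : List (List Int)) (out : Bool) : Prop := out = find_high_cluster_areas_alt grid
instance (grid : List (List Int)) (out : Bool) : Decidable (Spec_find_high_cluster_areas grid out) := by unfold Spec_find_high_cluster_areas; infer_instance

-- ===== CLAIM (what is proved, stated in full; the proofs are below) =====
def Claim_equal_find_high_cluster_areas : Prop := ∀ (grid : List (List Int)), Dom_find_high_cluster_areas grid → Pre_find_high_cluster_areas grid → Spec_find_high_cluster_areas grid (find_high_cluster_areas grid)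

-- ===== LEMMAS AND PROOFS =====

-- cell value both ports read (with the out-of-range default both ports use)
def pvCell (grid : List (List Int)) (y x : Nat) : Int := (grid.getD y []).getD x 0

-- the robot count of bucket (j, i), as a plain Nat-indexed double sum
def pvS (grid : List (List Int)) (aw ah j i : Nat) : Int :=
  ((List.range' (j * ah) ah).map (fun y =>
    ((List.range' (i * aw) aw).map (fun x => pvCell grid y x)).sum)).sum

def pvUpd (t : List (List Int)) (i j : Nat) (v : Int) : List (List Int) :=
  t.modify i (fun r => r.modify j (fun c => c + v))

def pvGet2 (t : List (List Int)) (i j : Nat) : Int := (t.getD i []).getD j 0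

def pvShape (t : List (List Int)) : Prop :=
  t.length = 10 ∧ ∀ (k : Nat) (r : List Int), t[k]? = some r → r.length = 10

lemma pyRange_cast (s len : Nat) :
    PySem.List.pyRange (s : Int) ((s : Int) + (len : Int)) =
      (List.range' s len).map (Nat.cast : Nat → Int) := by
  induction len generalizing s with
  | zero => simp [PySem.List.pyRange]
  | succ n ih =>
    rw [PySem.List.pyRange_one_cons (by push_cast; omega), List.range'_succ, List.map_cons]
    have h2 : (s : Int) + ((n + 1 : Nat) : Int) = ((s + 1 : Nat) : Int) + (n : Int) := by
      push_cast; ring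
    have h1 : (s : Int) + 1 = ((s + 1 : Nat) : Int) := by push_cast; ring
    rw [h2, h1, ih (s + 1)]

lemma robot_eq (grid : List (List Int)) (aw ah j i : Nat) :
    (PySem.List.pyRange ((j:Int) * (ah:Int)) ((j:Int) * (ah:Int) + (ah:Int))).foldl (fun acc y =>
      (PySem.List.pyRange ((i:Int) * (aw:Int)) ((i:Int) * (aw:Int) + (aw:Int))).foldl (fun acc x =>
        acc + PySem.List.pyGetD (PySem.List.pyGetD grid y []) x 0) acc) 0
    = pvS grid aw ah j i := by
  simp only [← Nat.cast_mul, pyRange_cast, List.foldl_map, PySem.List.pyGetD_natCast,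
    PySem.List.foldl_add, zero_add, pvS, pvCell]

lemma pyGet0_eq (grid : List (List Int)) :
    ((PySem.List.pyGet? grid 0).getD []) = grid.getD 0 [] := by
  cases grid <;> simp [PySem.List.pyGet?, List.getD_eq_getElem?_getD, PySem.List.pyIdx?]

lemma A_char (grid : List (List Int)) :
    find_high_cluster_areas grid = true ↔
      ∃ j < 10, ∃ i < 10,
        pvS grid ((grid.getD 0 []).length / 10) (grid.length / 10) j i > 50 := by
  have h10 : (10 : Int) = ((10 : Nat) : Int) := by norm_num
  unfold find_high_cluster_areas
  dsimp only
  rw [pyGet0_eq, h10, PySem.List.pyRange_zero_natCast, PySem.Int.floordiv_natCast,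
    PySem.Int.floordiv_natCast]
  simp only [List.any_map, Function.comp, List.any_eq_true, List.mem_range, robot_eq,
    decide_eq_true_eq]

lemma shape_upd (t : List (List Int)) (i j : Nat) (v : Int) (h : pvShape t) :
    pvShape (pvUpd t i j v) := by
  obtain ⟨h1, h2⟩ := h
  refine ⟨by simp [pvUpd, h1], ?_⟩
  intro k r hr
  rw [pvUpd, List.getElem?_modify] at hr
  by_cases hik : i = k
  · simp [hik] at hr
    obtain ⟨r0, hr0, hr0e⟩ := hr
    subst hr0e
    simpa using h2 k r0 hr0
  · simp [hik] at hr
    exact h2 k r hr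

lemma get2_upd (t : List (List Int)) (i j : Nat) (v : Int) (i' j' : Nat)
    (hsh : pvShape t) (hi : i < 10) (hj : j < 10) :
    pvGet2 (pvUpd t i j v) i' j' =
      pvGet2 t i' j' + if i = i' ∧ j = j' then v else 0 := by
  obtain ⟨h1, h2⟩ := hsh
  simp only [pvGet2, pvUpd, List.getD_eq_getElem?_getD, List.getElem?_modify]
  by_cases hik : i = i'
  · subst hik
    obtain ⟨r, hr⟩ : ∃ r, t[i]? = some r := by
      refine ⟨t[i]'(by omega), ?_⟩; simp
    have hrl := h2 i r hr
    simp only [hr, Option.map_some, Option.getD_some, if_pos rfl,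
      List.getD_eq_getElem?_getD, List.getElem?_modify]
    by_cases hjk : j = j'
    · subst hjk
      obtain ⟨c, hc⟩ : ∃ c, r[j]? = some c := by
        refine ⟨r[j]'(by omega), ?_⟩; simp
      simp [hc]
    · simp [hjk]
  · simp [hik]

lemma filter_range_sum (a j n : Nat) (f : Nat → Int) (ha : 0 < a) (hj : j < n) :
    (((List.range (n * a)).filter (fun x => x / a = j)).map f).sum =
      ((List.range' (j * a) a).map f).sum := by
  induction n with
  | zero => omega
  | succ n ih =>
    have hsplit : List.range ((n + 1) * a) =
        List.range (n * a) ++ List.range' (n * a) a := by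
      rw [show (n+1)*a = n*a + a by ring, List.range_add, List.range'_eq_map_range]
    rw [hsplit, List.filter_append, List.map_append, List.sum_append]
    have hblock : ∀ x ∈ List.range' (n * a) a, x / a = n := by
      intro x hx
      rw [List.mem_range'] at hx
      obtain ⟨i, hi, rfl⟩ := hx
      exact Nat.div_eq_of_lt_le (by omega) (by simp [Nat.succ_mul]; omega)
    by_cases hjn : j = n
    · subst hjn
      have hfirst : (List.range (j * a)).filter (fun x => x / a = j) = [] := by
        apply List.filter_eq_nil_iff.mpr
        intro x hx
        rw [List.mem_range] at hx
        have : x / a < j := (Nat.div_lt_iff_lt_mul ha).mpr (by omega)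
        simp; omega
      have hsecond : (List.range' (j * a) a).filter (fun x => x / a = j) =
          List.range' (j * a) a := by
        apply List.filter_eq_self.mpr
        intro x hx
        simp [hblock x hx]
      rw [hfirst, hsecond]; simp
    · have hsecond : (List.range' (n * a) a).filter (fun x => x / a = j) = [] := by
        apply List.filter_eq_nil_iff.mpr
        intro x hx
        simp [hblock x hx]
        omega
      rw [hsecond, ih (by omega)]; simp

def pvPartial (f : Nat → Int) (aw n j : Nat) : Int :=
  (((List.range n).filter (fun x => x / aw = j)).map f).sum

lemma inner_char (f : Nat → Int) (aw : Nat) (haw : 0 < aw) (bY : Nat) (hb : bY < 10)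
    (n : Nat) (hn : n ≤ 10 * aw) (t : List (List Int)) (hsh : pvShape t) :
    pvShape ((List.range n).foldl (fun t x => pvUpd t bY (x / aw) (f x)) t) ∧
    ∀ i j, pvGet2 ((List.range n).foldl (fun t x => pvUpd t bY (x / aw) (f x)) t) i j
      = pvGet2 t i j + if bY = i then pvPartial f aw n j else 0 := by
  induction n with
  | zero => refine ⟨hsh, ?_⟩; simp [pvPartial]
  | succ n ih =>
    obtain ⟨ihs, ihg⟩ := ih (by omega)
    rw [List.range_succ, List.foldl_append]
    refine ⟨shape_upd _ _ _ _ ihs, ?_⟩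
    intro i j
    have hdiv : n / aw < 10 := (Nat.div_lt_iff_lt_mul haw).mpr (by omega)
    simp only [List.foldl_cons, List.foldl_nil]
    rw [get2_upd _ _ _ _ _ _ ihs hb hdiv, ihg i j]
    have hpart : pvPartial f aw (n + 1) j =
        pvPartial f aw n j + if n / aw = j then f n else 0 := by
      simp only [pvPartial, List.range_succ, List.filter_append]
      by_cases hnj : n / aw = j <;> simp [hnj]
    rw [hpart]
    by_cases hbi : bY = i <;> by_cases hnj : n / aw = j <;> simp [hbi, hnj] <;> ring

def pvBStep (grid : List (List Int)) (aw ah : Nat) (t : List (List Int)) (y : Nat) :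
    List (List Int) :=
  (List.range (10 * aw)).foldl (fun t x => pvUpd t (y / ah) (x / aw) (pvCell grid y x)) t

def pvPartialY (grid : List (List Int)) (aw ah m i j : Nat) : Int :=
  (((List.range m).filter (fun y => y / ah = i)).map
    (fun y => pvPartial (pvCell grid y) aw (10 * aw) j)).sum

lemma outer_char (grid : List (List Int)) (aw ah : Nat) (haw : 0 < aw) (hah : 0 < ah)
    (m : Nat) (hm : m ≤ 10 * ah) (t : List (List Int)) (hsh : pvShape t) :
    pvShape ((List.range m).foldl (pvBStep grid aw ah) t) ∧
    ∀ i j, pvGet2 ((List.range m).foldl (pvBStep grid aw ah) t) i j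
      = pvGet2 t i j + pvPartialY grid aw ah m i j := by
  induction m with
  | zero => refine ⟨hsh, ?_⟩; simp [pvPartialY]
  | succ m ih =>
    obtain ⟨ihs, ihg⟩ := ih (by omega)
    rw [List.range_succ, List.foldl_append]
    have hby : m / ah < 10 := (Nat.div_lt_iff_lt_mul hah).mpr (by omega)
    have hin := inner_char (pvCell grid m) aw haw (m / ah) hby (10 * aw) (le_refl _)
      ((List.range m).foldl (pvBStep grid aw ah) t) ihs
    refine ⟨by simpa [pvBStep] using hin.1, ?_⟩
    intro i j
    simp only [List.foldl_cons, List.foldl_nil, pvBStep]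
    rw [hin.2 i j, ihg i j]
    have hpart : pvPartialY grid aw ah (m + 1) i j =
        pvPartialY grid aw ah m i j +
          if m / ah = i then pvPartial (pvCell grid m) aw (10 * aw) j else 0 := by
      simp only [pvPartialY, List.range_succ, List.filter_append]
      by_cases hmi : m / ah = i <;> simp [hmi]
    rw [hpart]
    ring

lemma shape_init : pvShape (List.replicate 10 (List.replicate 10 (0 : Int))) := by
  refine ⟨by simp, ?_⟩
  intro k r h
  rw [List.getElem?_replicate] at h
  split_ifs at h with hk
  · obtain rfl := Option.some_inj.mp h
    simp

lemma bfold_get2 (grid : List (List Int)) (aw ah : Nat) (haw : 0 < aw) (hah : 0 < ah)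
    (i j : Nat) (hi : i < 10) (hj : j < 10) :
    pvGet2 ((List.range (10 * ah)).foldl (pvBStep grid aw ah)
      (List.replicate 10 (List.replicate 10 (0 : Int)))) i j = pvS grid aw ah i j := by
  have h := (outer_char grid aw ah haw hah (10 * ah) (le_refl _) _ shape_init).2 i j
  rw [h]
  have h0 : pvGet2 (List.replicate 10 (List.replicate 10 (0 : Int))) i j = 0 := by
    simp only [pvGet2, List.getD_eq_getElem?_getD, List.getElem?_replicate,
      if_pos hi, if_pos hj, Option.getD_some]
  rw [h0, zero_add, pvPartialY, filter_range_sum ah i 10 _ hah hi, pvS]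
  congr 1
  apply List.map_congr_left
  intro y hy
  rw [pvPartial, filter_range_sum aw j 10 _ haw hj]

lemma bfold_shape (grid : List (List Int)) (aw ah : Nat) (haw : 0 < aw) (hah : 0 < ah) :
    pvShape ((List.range (10 * ah)).foldl (pvBStep grid aw ah)
      (List.replicate 10 (List.replicate 10 (0 : Int)))) :=
  (outer_char grid aw ah haw hah (10 * ah) (le_refl _) _ shape_init).1

lemma any_get2 (t : List (List Int)) (hsh : pvShape t) :
    ((t.any fun r => r.any fun c => decide (c > 50)) = true) ↔
      ∃ i < 10, ∃ j < 10, pvGet2 t i j > 50 := by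
  obtain ⟨h1, h2⟩ := hsh
  simp only [List.any_eq_true, decide_eq_true_eq]
  constructor
  · rintro ⟨r, hr, c, hc, hgt⟩
    obtain ⟨i, hi, rfl⟩ := List.mem_iff_getElem.mp hr
    obtain ⟨j, hj, rfl⟩ := List.mem_iff_getElem.mp hc
    refine ⟨i, by omega, j, ?_, ?_⟩
    · have := h2 i (t[i]) (by simp)
      omega
    · simp [pvGet2, List.getD_eq_getElem?_getD, hi, hj]
      exact hgt
  · rintro ⟨i, hi, j, hj, hgt⟩
    have hi' : i < t.length := by omega
    have hj' : j < (t[i]'hi').length := by rw [h2 i (t[i]'hi') (by simp)]; omega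
    refine ⟨t[i]'hi', List.mem_iff_getElem.mpr ⟨i, hi', rfl⟩,
      (t[i]'hi')[j]'hj', List.mem_iff_getElem.mpr ⟨j, hj', rfl⟩, ?_⟩
    simpa [pvGet2, List.getD_eq_getElem?_getD, List.getElem?_eq_getElem, hi', hj'] using hgt

lemma B_char (grid : List (List Int)) :
    find_high_cluster_areas_alt grid =
      if (grid.getD 0 []).length / 10 = 0 ∨ grid.length / 10 = 0 then false
      else ((List.range (10 * (grid.length / 10))).foldl
        (pvBStep grid ((grid.getD 0 []).length / 10) (grid.length / 10))
        (List.replicate 10 (List.replicate 10 (0 : Int)))).any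
          fun r => r.any fun c => decide (c > 50) := by
  have h10 : (10 : Int) = ((10 : Nat) : Int) := by norm_num
  unfold find_high_cluster_areas_alt
  dsimp only
  rw [pyGet0_eq, h10, PySem.Int.floordiv_natCast, PySem.Int.floordiv_natCast]
  simp only [Nat.cast_eq_zero, ← Nat.cast_mul, PySem.List.pyRange_zero_natCast,
    List.foldl_map, PySem.List.pyGetD_natCast, PySem.Int.floordiv_natCast,
    Int.toNat_natCast]
  rfl

lemma pvS_zero (grid : List (List Int)) (aw ah j i : Nat) (h : aw = 0 ∨ ah = 0) :
    pvS grid aw ah j i = 0 := by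
  rcases h with h | h <;> subst h <;> simp [pvS]

-- ===== VERDICT (by name: the statement is the Claim_ definition above) =====
theorem find_high_cluster_areas_spec : Claim_equal_find_high_cluster_areas := by
  intro grid _ _
  unfold Spec_find_high_cluster_areas
  rw [B_char]
  by_cases hz : (grid.getD 0 []).length / 10 = 0 ∨ grid.length / 10 = 0
  · rw [if_pos hz]
    cases hA : find_high_cluster_areas grid with
    | false => rfl
    | true =>
      obtain ⟨j, hj, i, hi, hgt⟩ := (A_char grid).mp hA
      rw [pvS_zero grid _ _ j i hz] at hgt
      omega
  · rw [if_neg hz]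
    push_neg at hz
    have haw : 0 < (grid.getD 0 []).length / 10 := by omega
    have hah : 0 < grid.length / 10 := by omega
    rw [Bool.eq_iff_iff, A_char,
      any_get2 _ (bfold_shape grid _ _ haw hah)]
    constructor <;> rintro ⟨a, ha, b, hb, hgt⟩ <;>
      exact ⟨a, ha, b, hb, by
        rw [bfold_get2 grid _ _ haw hah a b ha hb] at *
        exact hgt⟩
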